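-- pv_equiv track=rewrite | github.com/Intern-Media-Prima/Mini-Project-1 | clean.py | group_by_client
-- ===== SOURCE A (Python) =====
-- def group_by_client(data):
-- 	row = len(data)
-- 	col = len(data[0])
-- 	clients = {}
-- 	client = 'Unknown'
-- 	for i in range(row):
-- 		if data[i][0] != '':
-- 			client = data[i][0]
-- 		elif client != 'Unknown':
-- 			if not client in clients:
-- 				clients[client] = {'columns' : [data[i][1:]]}
-- 			else:
-- 				clients[client]['columns'].append(data[i][1:])
-- 	return clients
-- ===== SOURCE B (Python) =====
-- def group_by_client(data):
--     # pass 1: forward-fill the most recent client label, collecting (label, tail) pairs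
--     labeled = []
--     client = 'Unknown'
--     for row in data:
--         if row[0] != '':
--             client = row[0]
--         elif client != 'Unknown':
--             labeled.append((client, row[1:]))
--     # pass 2: group the collected pairs
--     clients = {}
--     for label, tail in labeled:
--         clients.setdefault(label, {'columns': []})['columns'].append(tail)
--     return clients
-- ===== Notes on version B (the rewrite author's own statement) =====
-- stated objective: alternative
-- what changed: Replaces A's single index-driven loop that interleaves label tracking with dict membership tests and in-place appends by a two-pass decomposition: first forward-fill the most recent client label into a flat list of (label, tail) pairs, then group that list with setdefault.
-- crash fix: On empty input data A raises IndexError (len(data[0])); B returns the empty dict. — e.g. on group_by_client([]): A raises IndexError, B returns []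
import Mathlib
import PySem

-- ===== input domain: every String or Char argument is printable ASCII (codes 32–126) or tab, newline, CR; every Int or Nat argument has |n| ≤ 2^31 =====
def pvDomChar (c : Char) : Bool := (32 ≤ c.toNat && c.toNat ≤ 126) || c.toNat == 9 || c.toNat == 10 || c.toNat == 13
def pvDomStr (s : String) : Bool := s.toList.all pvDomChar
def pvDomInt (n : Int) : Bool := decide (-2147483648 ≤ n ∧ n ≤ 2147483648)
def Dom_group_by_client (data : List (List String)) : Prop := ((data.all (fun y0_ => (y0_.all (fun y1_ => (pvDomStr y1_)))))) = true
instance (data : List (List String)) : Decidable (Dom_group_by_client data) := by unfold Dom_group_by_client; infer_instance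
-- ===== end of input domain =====

-- B is a two-pass decomposition (forward-fill labels into a list of (label, tail) pairs, then
-- group that list with setdefault); the return value is proved equal to A's wherever A returns.

-- ===== PORT A =====
-- A's single loop over the rows, carrying (clients, client); data[i][0] via pyGet? (in range on Pre_)
def pvAStep (s : PySem.Dict String (PySem.Dict String (List (List String))) × String)
    (r : List String) : PySem.Dict String (PySem.Dict String (List (List String))) × String :=
  let h := (PySem.List.pyGet? r 0).getD ""
  if h ≠ "" then (s.1, h)
  else if s.2 ≠ "Unknown" then
    if s.1.contains s.2 = false then
      (s.1.insert s.2 (PySem.Dict.ofList [("columns", [PySem.List.slice r (some 1) none])]), s.2)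
    else
      (s.1.modify s.2 PySem.Dict.empty
        (fun d => d.modify "columns" [] (fun l => l ++ [PySem.List.slice r (some 1) none])), s.2)
  else s

def group_by_client (data : List (List String)) : List (String × List (String × List (List String))) :=
  let clients := (data.foldl pvAStep (PySem.Dict.empty, "Unknown")).1
  clients.items.map (fun p => (p.1, p.2.items))

-- ===== PORT B =====
-- pass 1: forward-fill the label, collecting (label, tail) pairs
def pvPass1Step (s : String × List (String × List String)) (r : List String) :
    String × List (String × List String) :=
  let h := (PySem.List.pyGet? r 0).getD ""
  if h ≠ "" then (h, s.2)
  else if s.1 ≠ "Unknown" then (s.1, s.2 ++ [(s.1, PySem.List.slice r (some 1) none)])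
  else s

-- pass 2: clients.setdefault(label, {'columns': []})['columns'].append(tail)
def pvBStep (d : PySem.Dict String (PySem.Dict String (List (List String))))
    (p : String × List String) : PySem.Dict String (PySem.Dict String (List (List String))) :=
  (d.setdefault p.1 (PySem.Dict.ofList [("columns", [])])).modify p.1 PySem.Dict.empty
    (fun inner => inner.modify "columns" [] (fun l => l ++ [p.2]))

def group_by_client_alt (data : List (List String)) : List (String × List (String × List (List String))) :=
  let labeled := (data.foldl pvPass1Step ("Unknown", [])).2
  let clients := labeled.foldl pvBStep PySem.Dict.empty
  clients.items.map (fun p => (p.1, p.2.items))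

-- ===== PRECONDITION & SPEC =====
-- A raises IndexError on empty data (len(data[0])) and on any empty row (data[i][0]); Pre_ excludes exactly those.
def Pre_group_by_client (data : List (List String)) : Prop :=
  data ≠ [] ∧ ∀ r ∈ data, r ≠ []
instance (data : List (List String)) : Decidable (Pre_group_by_client data) := by
  unfold Pre_group_by_client; infer_instance

def pvWitness_group_by_client : List (List String) := [["Acme", "x"], ["", "y"], ["", "z"]]

-- A raises IndexError on empty input data (len(data[0])); B returns the empty dict there.
def Raises_group_by_client (data : List (List String)) : Prop := data = []
instance (data : List (List String)) : Decidable (Raises_group_by_client data) := by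
  unfold Raises_group_by_client; infer_instance
def pvRaiseWitness_group_by_client : List (List String) := []
def pvRaiseWitnessOut_group_by_client : List (String × List (String × List (List String))) := []

def Spec_group_by_client (data : List (List String)) (out : List (String × List (String × List (List String)))) : Prop := out = group_by_client_alt data
instance (data : List (List String)) (out : List (String × List (String × List (List String)))) : Decidable (Spec_group_by_client data out) := by unfold Spec_group_by_client; infer_instance

-- ===== CLAIM (what is proved, stated in full; the proofs are below) =====
def Claim_equal_group_by_client : Prop := ∀ (data : List (List String)), Dom_group_by_client data → Pre_group_by_client data → Spec_group_by_client data (group_by_client data)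
def Claim_raises_group_by_client : Prop := (∀ (data : List (List String)), Dom_group_by_client data → Raises_group_by_client data → ¬ Pre_group_by_client data) ∧ (Dom_group_by_client (pvRaiseWitness_group_by_client) ∧ Raises_group_by_client (pvRaiseWitness_group_by_client) ∧ group_by_client_alt (pvRaiseWitness_group_by_client) = pvRaiseWitnessOut_group_by_client)

-- ===== LEMMAS AND PROOFS =====

-- step-evaluation lemmas for the three branches of each loop body
lemma pvAStep_label {r : List String} (c : PySem.Dict String (PySem.Dict String (List (List String)))) (cl : String)
    (h1 : (PySem.List.pyGet? r 0).getD "" ≠ "") :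
    pvAStep (c, cl) r = (c, (PySem.List.pyGet? r 0).getD "") := by
  simp [pvAStep, h1]

lemma pvAStep_blank {r : List String} (c : PySem.Dict String (PySem.Dict String (List (List String)))) (cl : String)
    (h1 : (PySem.List.pyGet? r 0).getD "" = "") (h2 : cl ≠ "Unknown") :
    pvAStep (c, cl) r =
      ((if c.contains cl = false then
          c.insert cl (PySem.Dict.ofList [("columns", [PySem.List.slice r (some 1) none])])
        else
          c.modify cl PySem.Dict.empty
            (fun d => d.modify "columns" [] (fun l => l ++ [PySem.List.slice r (some 1) none]))), cl) := by
  simp only [pvAStep, h1]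
  simp [h2]
  split <;> rfl

lemma pvAStep_skip {r : List String} (c : PySem.Dict String (PySem.Dict String (List (List String)))) (cl : String)
    (h1 : (PySem.List.pyGet? r 0).getD "" = "") (h2 : cl = "Unknown") :
    pvAStep (c, cl) r = (c, cl) := by
  simp [pvAStep, h1, h2]

lemma pvPass1Step_label {r : List String} (cl : String) (acc : List (String × List String))
    (h1 : (PySem.List.pyGet? r 0).getD "" ≠ "") :
    pvPass1Step (cl, acc) r = ((PySem.List.pyGet? r 0).getD "", acc) := by
  simp [pvPass1Step, h1]

lemma pvPass1Step_blank {r : List String} (cl : String) (acc : List (String × List String))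
    (h1 : (PySem.List.pyGet? r 0).getD "" = "") (h2 : cl ≠ "Unknown") :
    pvPass1Step (cl, acc) r = (cl, acc ++ [(cl, PySem.List.slice r (some 1) none)]) := by
  simp [pvPass1Step, h1, h2]

lemma pvPass1Step_skip {r : List String} (cl : String) (acc : List (String × List String))
    (h1 : (PySem.List.pyGet? r 0).getD "" = "") (h2 : cl = "Unknown") :
    pvPass1Step (cl, acc) r = (cl, acc) := by
  simp [pvPass1Step, h1, h2]

-- Dict.modify written as an insert (definitional; bridges A's in-place append to B's)
lemma pvModify_eq {κ ν : Type} [BEq κ] (d : PySem.Dict κ ν) (k : κ) (dflt : ν) (f : ν → ν) :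
    d.modify k dflt f = d.insert k (f (d.getD k dflt)) := rfl

-- A's grouping step equals B's setdefault-then-append step
lemma pvStep_eq (c : PySem.Dict String (PySem.Dict String (List (List String))))
    (k : String) (t : List String) :
    (if c.contains k = false then c.insert k (PySem.Dict.ofList [("columns", [t])])
     else c.modify k PySem.Dict.empty
       (fun d => d.modify "columns" [] (fun l => l ++ [t]))) = pvBStep c (k, t) := by
  simp only [pvBStep]
  by_cases h : c.contains k
  · rw [PySem.Dict.setdefault_of_contains _ _ h]
    simp [h]
  · have h' : c.contains k = false := by simpa using h
    rw [if_pos h', PySem.Dict.setdefault_of_not_contains _ _ h',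
      pvModify_eq (c.insert k (PySem.Dict.ofList [("columns", [])])),
      PySem.Dict.getD_insert_self, PySem.Dict.insert_insert_self]
    rfl

-- pass 1 accumulates by appending: the accumulator factors out
lemma pvPass1_acc (data : List (List String)) (cl : String) (acc : List (String × List String)) :
    data.foldl pvPass1Step (cl, acc) =
      ((data.foldl pvPass1Step (cl, []) ).1, acc ++ (data.foldl pvPass1Step (cl, [])).2) := by
  induction data generalizing cl acc with
  | nil => simp
  | cons r rest ih =>
    simp only [List.foldl_cons]
    by_cases h1 : (PySem.List.pyGet? r 0).getD "" = ""
    · by_cases h2 : cl = "Unknown"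
      · rw [pvPass1Step_skip cl acc h1 h2, pvPass1Step_skip cl [] h1 h2, ih]
      · rw [pvPass1Step_blank cl acc h1 h2, pvPass1Step_blank cl [] h1 h2,
          ih cl (acc ++ [(cl, PySem.List.slice r (some 1) none)])]
        simp only [List.nil_append]
        rw [ih cl [(cl, PySem.List.slice r (some 1) none)]]
        simp
    · rw [pvPass1Step_label cl acc h1, pvPass1Step_label cl [] h1, ih]

-- main invariant: A's one-pass fold equals pass 2 applied to pass 1's output, from any start state
lemma pvMain (data : List (List String)) (c : PySem.Dict String (PySem.Dict String (List (List String)))) (cl : String) :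
    data.foldl pvAStep (c, cl) =
      ((data.foldl pvPass1Step (cl, [])).2.foldl pvBStep c, (data.foldl pvPass1Step (cl, [])).1) := by
  induction data generalizing c cl with
  | nil => simp
  | cons r rest ih =>
    simp only [List.foldl_cons]
    by_cases h1 : (PySem.List.pyGet? r 0).getD "" = ""
    · by_cases h2 : cl = "Unknown"
      · rw [pvAStep_skip c cl h1 h2, pvPass1Step_skip cl [] h1 h2, ih]
      · rw [pvAStep_blank c cl h1 h2, pvPass1Step_blank cl [] h1 h2, ih]
        simp only [List.nil_append]
        rw [pvPass1_acc rest cl [(cl, PySem.List.slice r (some 1) none)]]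
        simp only [List.foldl_append, List.foldl_cons, List.foldl_nil]
        rw [pvStep_eq]
    · rw [pvAStep_label c cl h1, pvPass1Step_label cl [] h1, ih]

-- ===== VERDICT (by name: the statement is the Claim_ definition above) =====
theorem group_by_client_spec : Claim_equal_group_by_client := by
  intro data _ _
  unfold Spec_group_by_client group_by_client group_by_client_alt
  rw [pvMain]

theorem group_by_client_raises : Claim_raises_group_by_client := by
  unfold Claim_raises_group_by_client
  exact ⟨fun data _ hr hpre => hpre.1 hr, by decide, by decide, rfl⟩

-- self-check: the raise region is inhabited (extracted from the theorem above)
theorem pvRaiseWitness_ok : Raises_group_by_client pvRaiseWitness_group_by_client :=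
  group_by_client_raises.2.2.1
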